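-- pv_equiv track=rewrite | github.com/Achoobert/RoasterSyncer | roaster-syncer/roaster.py | timestampIncr
-- ===== SOURCE A (Python) =====
-- def timestampIncr(ts):
-- 	tsList = ts.split(":")
-- 	sec = int(tsList[1])
-- 	minutes = int(tsList[0])
-- 	sec = sec+5
-- 	while sec / 60 >= 1:
-- 		minutes = minutes + 1
-- 		sec = sec - 60
-- 	# return "{02d}:{02d}".format(minutes, sec)
-- 	if minutes < 10:
-- 		if sec < 6 :
-- 			return '0'+str(minutes)+':0'+str(sec)
-- 		return '0'+str(minutes)+':'+str(sec)
-- 	if sec < 6: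
-- 		return str(minutes)+':0'+str(sec)
-- 	return str(minutes)+':'+str(sec)
-- ===== SOURCE B (Python) =====
-- def timestampIncr(ts):
--     parts = ts.split(":")
--     minutes = int(parts[0])
--     sec = int(parts[1]) + 5
--     if sec >= 60:
--         minutes += sec // 60
--         sec %= 60
--     mp = '0' if minutes < 10 else ''
--     sp = '0' if sec < 6 else ''
--     return mp + str(minutes) + ':' + sp + str(sec)
-- ===== Notes on version B (the rewrite author's own statement) =====
-- stated objective: simpler
-- what changed: Replaces the while-loop that repeatedly subtracts 60 with a single guarded divmod carry (sec//60, sec%60 only when sec>=60) and collapses the four-way formatting cascade into two pad variables.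
import Mathlib
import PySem

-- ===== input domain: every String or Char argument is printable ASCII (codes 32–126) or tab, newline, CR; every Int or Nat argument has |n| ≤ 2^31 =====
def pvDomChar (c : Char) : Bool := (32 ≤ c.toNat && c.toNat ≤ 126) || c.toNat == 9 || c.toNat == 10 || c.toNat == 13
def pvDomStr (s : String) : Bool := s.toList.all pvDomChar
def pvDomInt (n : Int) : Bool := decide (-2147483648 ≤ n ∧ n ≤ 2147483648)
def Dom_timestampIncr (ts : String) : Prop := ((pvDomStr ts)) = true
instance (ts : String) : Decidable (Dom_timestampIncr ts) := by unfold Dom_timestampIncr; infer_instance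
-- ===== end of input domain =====

-- B replaces A's repeated-subtraction while-loop by one guarded divmod carry and the
-- four-way formatting cascade by two pad variables; same return value wherever A returns.

-- ===== PORT A =====
-- 'while sec / 60 >= 1: minutes += 1; sec -= 60' — on integers the float test 'sec/60 >= 1'
-- is exactly '60 ≤ sec' (exact on the domain's magnitudes); the loop is this recursion.
def tiLoop (minutes sec : Int) : Int × Int :=
  if h : 60 ≤ sec then tiLoop (minutes + 1) (sec - 60) else (minutes, sec)
termination_by sec.toNat
decreasing_by omega

def timestampIncr (ts : String) : String :=
  let tsList := (PySem.Chars.splitOn ts.toList [':']).map String.ofList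
  match PySem.List.pyGet? tsList 1 with
  | none => ""  -- IndexError: excluded by Pre_
  | some s1 =>
    match PySem.Int.ofStr? s1 with
    | none => ""  -- ValueError: excluded by Pre_
    | some sec0 =>
      match PySem.List.pyGet? tsList 0 with
      | none => ""  -- unreachable (split is nonempty); excluded by Pre_
      | some s0 =>
        match PySem.Int.ofStr? s0 with
        | none => ""  -- ValueError: excluded by Pre_
        | some minutes0 =>
          let sec := sec0 + 5
          let p := tiLoop minutes0 sec
          let minutes := p.1
          let sec := p.2
          if minutes < 10 then
            if sec < 6 then "0" ++ PySem.Int.toStr minutes ++ ":0" ++ PySem.Int.toStr sec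
            else "0" ++ PySem.Int.toStr minutes ++ ":" ++ PySem.Int.toStr sec
          else if sec < 6 then PySem.Int.toStr minutes ++ ":0" ++ PySem.Int.toStr sec
          else PySem.Int.toStr minutes ++ ":" ++ PySem.Int.toStr sec

-- ===== PORT B =====
def timestampIncr_alt (ts : String) : String :=
  let parts := (PySem.Chars.splitOn ts.toList [':']).map String.ofList
  match PySem.List.pyGet? parts 0 with
  | none => ""  -- unreachable (split is nonempty); excluded by Pre_
  | some s0 =>
    match PySem.Int.ofStr? s0 with
    | none => ""  -- ValueError: excluded by Pre_
    | some minutes0 =>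
      match PySem.List.pyGet? parts 1 with
      | none => ""  -- IndexError: excluded by Pre_
      | some s1 =>
        match PySem.Int.ofStr? s1 with
        | none => ""  -- ValueError: excluded by Pre_
        | some sec1 =>
          let sec0 := sec1 + 5
          let minutes := if 60 ≤ sec0 then minutes0 + PySem.Int.floordiv sec0 60 else minutes0
          let sec := if 60 ≤ sec0 then PySem.Int.mod sec0 60 else sec0
          let mp := if minutes < 10 then "0" else ""
          let sp := if sec < 6 then "0" else ""
          mp ++ PySem.Int.toStr minutes ++ ":" ++ sp ++ PySem.Int.toStr sec

-- ===== PRECONDITION & SPEC =====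
-- Pre_ excludes exactly the inputs where Python A raises: strings whose colon-split has
-- fewer than two fields (IndexError) or whose first/second field is not an int literal (ValueError).
def Pre_timestampIncr (ts : String) : Prop :=
  2 ≤ ((PySem.Chars.splitOn ts.toList [':']).map String.ofList).length ∧
  (PySem.Int.ofStr? (((PySem.Chars.splitOn ts.toList [':']).map String.ofList).getD 0 "")).isSome = true ∧
  (PySem.Int.ofStr? (((PySem.Chars.splitOn ts.toList [':']).map String.ofList).getD 1 "")).isSome = true

instance (ts : String) : Decidable (Pre_timestampIncr ts) := by unfold Pre_timestampIncr; infer_instance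

def pvWitness_timestampIncr : String := "12:57"

def Spec_timestampIncr (ts : String) (out : String) : Prop := out = timestampIncr_alt ts
instance (ts : String) (out : String) : Decidable (Spec_timestampIncr ts out) := by unfold Spec_timestampIncr; infer_instance

-- ===== CLAIM (what is proved, stated in full; the proofs are below) =====
def Claim_equal_timestampIncr : Prop := ∀ (ts : String), Dom_timestampIncr ts → Pre_timestampIncr ts → Spec_timestampIncr ts (timestampIncr ts)

-- ===== LEMMAS AND PROOFS =====

theorem tiLoop_eq (m s : Int) :
    tiLoop m s = if 60 ≤ s then (m + PySem.Int.floordiv s 60, PySem.Int.mod s 60) else (m, s) := by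
  by_cases h : 60 ≤ s
  · rw [PySem.Int.floordiv_eq_ediv_of_pos (by omega), PySem.Int.mod_eq_emod_of_pos (by omega)]
    simp only [if_pos h]
    have hs : 0 ≤ s := by omega
    obtain ⟨n, rfl⟩ := Int.eq_ofNat_of_zero_le hs
    induction n using Nat.strong_induction_on generalizing m with
    | _ n ih =>
      rw [tiLoop]
      by_cases h2 : 60 ≤ (n : Int) - 60
      · have hn : n - 60 < n := by omega
        have : ((n : Int) - 60) = ((n - 60 : Nat) : Int) := by omega
        rw [dif_pos h, this, ih (n - 60) hn (m + 1) (by rw [this] at h2; omega) (by positivity)]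
        rw [Prod.mk.injEq, ← this]
        constructor <;> omega
      · rw [dif_pos h, tiLoop, dif_neg (by omega)]
        rw [Prod.mk.injEq]
        constructor <;> omega
  · rw [tiLoop, dif_neg h, if_neg h]

-- ===== VERDICT (by name: the statement is the Claim_ definition above) =====
theorem timestampIncr_spec : Claim_equal_timestampIncr := by
  intro ts _ hpre
  obtain ⟨hlen, h0, h1⟩ := hpre
  unfold Spec_timestampIncr timestampIncr timestampIncr_alt
  match hp : (PySem.Chars.splitOn ts.toList [':']).map String.ofList with
  | [] => rw [hp] at hlen; simp at hlen
  | [a] => rw [hp] at hlen; simp at hlen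
  | a :: b :: rest =>
    rw [hp] at h0 h1
    simp only [List.getD_cons_zero] at h0
    simp only [List.getD_cons_succ, List.getD_cons_zero] at h1
    obtain ⟨mv, hm⟩ := Option.isSome_iff_exists.mp h0
    obtain ⟨sv, hs⟩ := Option.isSome_iff_exists.mp h1
    have hg0 : PySem.List.pyGet? (a :: b :: rest) 0 = some a :=
      PySem.List.pyGet?_zero_cons a (b :: rest)
    have hg1 : PySem.List.pyGet? (a :: b :: rest) 1 = some b := by
      rw [show ((1 : Int)) = ((1 : Nat) : Int) from rfl, PySem.List.pyGet?_natCast]; rfl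
    simp only [hg0, hg1, hm, hs, tiLoop_eq]
    by_cases hc : 60 ≤ sv + 5 <;>
      simp only [hc, if_true, if_false] <;>
      split_ifs <;>
      simp [String.append_assoc]
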